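-- pv_equiv track=rewrite | github.com/920293630/batch-auth-quota | batch_auth_quota.py | _is_safe_bearer_token
-- ===== SOURCE A (Python) =====
-- def _is_safe_bearer_token(s: str) -> bool:
--     """
--     Header values containing whitespace/control/non-ASCII are often rejected before reaching Gin,
--     resulting in a plain 400 Bad Request. Management keys should be simple ASCII tokens.
--     """
--     if not s:
--         return False
--     for ch in s:
--         if ch.isspace():
--             return False
--         o = ord(ch)
--         if o < 0x21 or o > 0x7E:
--             return False
--     return True
-- ===== SOURCE B (Python) =====
-- import re
--
-- _TOKEN_RE = re.compile(r'[\x21-\x7E]+')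
--
-- def _is_safe_bearer_token(s: str) -> bool:
--     return bool(_TOKEN_RE.fullmatch(s))
-- ===== Notes on version B (the rewrite author's own statement) =====
-- stated objective: idiomatic
-- what changed: Replaced the explicit per-character loop with early returns (isspace check plus ord-range check) by a single precompiled regex fullmatch against [\x21-\x7E]+, exploiting that the isspace test is redundant since all whitespace lies outside that range.
import Mathlib
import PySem

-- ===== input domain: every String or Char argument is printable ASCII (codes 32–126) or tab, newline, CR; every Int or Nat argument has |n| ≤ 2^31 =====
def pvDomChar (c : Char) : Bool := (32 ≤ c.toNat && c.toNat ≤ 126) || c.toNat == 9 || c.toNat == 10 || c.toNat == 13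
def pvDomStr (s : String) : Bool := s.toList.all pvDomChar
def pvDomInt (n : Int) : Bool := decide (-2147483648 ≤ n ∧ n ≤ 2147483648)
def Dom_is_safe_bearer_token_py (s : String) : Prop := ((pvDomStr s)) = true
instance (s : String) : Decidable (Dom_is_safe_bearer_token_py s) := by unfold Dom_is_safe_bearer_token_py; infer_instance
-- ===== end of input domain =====

-- B replaces A's per-character loop (isspace + ord-range early returns) by a regex
-- fullmatch against [\x21-\x7E]+ (ported as: non-empty and all codes in [0x21,0x7E]);
-- objective: more idiomatic.

-- ===== PORT A =====
-- A's for-loop with early returns, as structural recursion over the characters.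
def tokLoopA : List Char → Bool
  | [] => true
  | c :: cs =>
      if PySem.Chars.isspace c then false
      else if c.toNat < 0x21 || 0x7E < c.toNat then false
      else tokLoopA cs

def is_safe_bearer_token_py (s : String) : Bool :=
  if s.toList = [] then false else tokLoopA s.toList

-- ===== PORT B =====
-- re.fullmatch(r'[\x21-\x7E]+', s): non-empty, and every character in the class.
def is_safe_bearer_token_py_alt (s : String) : Bool :=
  !s.toList.isEmpty && s.toList.all (fun c => 0x21 ≤ c.toNat && c.toNat ≤ 0x7E)

-- ===== PRECONDITION & SPEC =====
def Spec_is_safe_bearer_token_py (s : String) (out : Bool) : Prop := out = is_safe_bearer_token_py_alt s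
instance (s : String) (out : Bool) : Decidable (Spec_is_safe_bearer_token_py s out) := by unfold Spec_is_safe_bearer_token_py; infer_instance

-- ===== CLAIM (what is proved, stated in full; the proofs are below) =====
def Claim_equal_is_safe_bearer_token_py : Prop := ∀ (s : String), Dom_is_safe_bearer_token_py s → Spec_is_safe_bearer_token_py s (is_safe_bearer_token_py s)

-- ===== LEMMAS AND PROOFS =====

-- Within the domain (printable ASCII plus tab/newline/CR), isspace holds exactly on
-- codes 9, 10, 13 and 32 — all below 0x21.
theorem isspace_of_dom (c : Char) (h : pvDomChar c = true) (hs : PySem.Chars.isspace c = true) :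
    c.toNat < 0x21 := by
  simp [pvDomChar] at h
  simp [PySem.Chars.isspace] at hs
  omega

theorem tokLoopA_eq_all (cs : List Char) (h : cs.all pvDomChar = true) :
    tokLoopA cs = cs.all (fun c => 0x21 ≤ c.toNat && c.toNat ≤ 0x7E) := by
  induction cs with
  | nil => rfl
  | cons c cs ih =>
    simp only [List.all_cons, Bool.and_eq_true] at h
    obtain ⟨hc, hcs⟩ := h
    simp only [tokLoopA, List.all_cons]
    by_cases hs : PySem.Chars.isspace c = true
    · have hlt := isspace_of_dom c hc hs
      have h2 : (decide (0x21 ≤ c.toNat) && decide (c.toNat ≤ 0x7E)) = false := by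
        simp; omega
      simp [hs, h2]
    · simp only [Bool.not_eq_true] at hs
      by_cases hr : c.toNat < 0x21 ∨ 0x7E < c.toNat
      · have h1 : (decide (c.toNat < 0x21) || decide (0x7E < c.toNat)) = true := by
          simp; omega
        have h2 : (decide (0x21 ≤ c.toNat) && decide (c.toNat ≤ 0x7E)) = false := by
          simp; omega
        simp [hs, h1, h2]
      · have h1 : (decide (c.toNat < 0x21) || decide (0x7E < c.toNat)) = false := by
          simp; omega
        have h2 : (decide (0x21 ≤ c.toNat) && decide (c.toNat ≤ 0x7E)) = true := by
          simp; omega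
        simp [hs, h1, h2, ih hcs]

-- ===== VERDICT (by name: the statement is the Claim_ definition above) =====
theorem is_safe_bearer_token_py_spec : Claim_equal_is_safe_bearer_token_py := by
  intro s hdom
  unfold Spec_is_safe_bearer_token_py is_safe_bearer_token_py is_safe_bearer_token_py_alt
  unfold Dom_is_safe_bearer_token_py pvDomStr at hdom
  by_cases hnil : s.toList = []
  · simp [hnil]
  · rw [if_neg hnil, tokLoopA_eq_all s.toList hdom]
    have : s.toList.isEmpty = false := by
      simp [hnil]
    rw [this]
    simp
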